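-- pv_equiv track=rewrite | github.com/Tencent/KsanaLLM | src/ksana_llm/python/openaiapi/serving_chat.py | _bracket_level
-- ===== SOURCE A (Python) =====
-- def _bracket_level(text: str) -> int:
--     """计算文本中的括号层级"""
--     level = 0
--     for c in text:
--         if c == '{':
--             level += 1
--         elif c == '}':
--             level -= 1
--     return level
-- ===== SOURCE B (Python) =====
-- def _bracket_level(text: str) -> int:
--     return text.count('{') - text.count('}')
-- ===== Notes on version B (the rewrite author's own statement) =====
-- stated objective: idiomatic
-- what changed: Replaces the single character-by-character accumulator loop with two str.count library scans, one per brace kind, combined by subtraction.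
import Mathlib
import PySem

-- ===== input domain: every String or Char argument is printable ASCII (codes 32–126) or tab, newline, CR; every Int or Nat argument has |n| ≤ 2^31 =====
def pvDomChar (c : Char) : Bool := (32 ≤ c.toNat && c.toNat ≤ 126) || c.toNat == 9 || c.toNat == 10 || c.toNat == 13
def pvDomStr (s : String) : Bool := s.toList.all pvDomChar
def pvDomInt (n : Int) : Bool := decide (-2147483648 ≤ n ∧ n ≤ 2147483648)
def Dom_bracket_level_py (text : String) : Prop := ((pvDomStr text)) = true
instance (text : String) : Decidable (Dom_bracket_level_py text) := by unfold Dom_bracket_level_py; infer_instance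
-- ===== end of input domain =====

-- B replaces the per-character accumulator loop with two library count scans combined arithmetically (idiomatic).

-- ===== PORT A =====
-- literal port of A: one fold over the characters updating a level accumulator
def bracket_level_py (text : String) : Int :=
  text.toList.foldl (fun level c =>
    if c = '{' then level + 1
    else if c = '}' then level - 1
    else level) 0

-- ===== PORT B =====
-- literal port of B: text.count('{') - text.count('}')
def bracket_level_py_alt (text : String) : Int :=
  (PySem.Str.count text "{" : Int) - (PySem.Str.count text "}" : Int)

-- ===== PRECONDITION & SPEC =====
def Spec_bracket_level_py (text : String) (out : Int) : Prop := out = bracket_level_py_alt text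
instance (text : String) (out : Int) : Decidable (Spec_bracket_level_py text out) := by unfold Spec_bracket_level_py; infer_instance

-- ===== CLAIM (what is proved, stated in full; the proofs are below) =====
def Claim_equal_bracket_level_py : Prop := ∀ (text : String), Dom_bracket_level_py text → Spec_bracket_level_py text (bracket_level_py text)

-- ===== LEMMAS AND PROOFS =====
-- Python str.count with a single-character needle is the character count
theorem pv_count_go_one (c : Char) (s : List Char) (acc : Nat) :
    PySem.Chars.count.go [c] s.length s acc = acc + s.count c := by
  induction s generalizing acc with
  | nil => simp [PySem.Chars.count.go]
  | cons a t ih =>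
      simp [PySem.Chars.count.go, List.isPrefixOf]
      split_ifs with h
      · simp_all; omega
      · simp_all [List.count_cons]; exact fun e => h e.symm

theorem pv_count_one (s : List Char) (c : Char) : PySem.Chars.count s [c] = s.count c := by
  simpa [PySem.Chars.count] using pv_count_go_one c s 0

theorem pv_fold_eq (s : List Char) (lvl : Int) :
    s.foldl (fun level c => if c = '{' then level + 1 else if c = '}' then level - 1 else level) lvl
      = lvl + (s.count '{' : Int) - (s.count '}' : Int) := by
  induction s generalizing lvl with
  | nil => simp
  | cons a t ih =>
      simp only [List.foldl_cons, ih, List.count_cons]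
      split_ifs with h1 h2 <;> simp_all <;> ring

-- ===== VERDICT (by name: the statement is the Claim_ definition above) =====
theorem bracket_level_py_spec : Claim_equal_bracket_level_py := by
  intro text _
  unfold Spec_bracket_level_py bracket_level_py bracket_level_py_alt
  have h : ("{" : String).toList = ['{'] := rfl
  have h2 : ("}" : String).toList = ['}'] := rfl
  simp [PySem.Str.count_eq, h, h2, pv_count_one, pv_fold_eq]
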